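-- pv_equiv track=rewrite | github.com/fuzzy-tribble/dcs-simulation-engine | dcs_simulation_engine/utils/serde.py | _yaml_block_for_path
-- ===== SOURCE A (Python) =====
-- def _yaml_block_for_path(path: str, leaf: str) -> str:
--     """Build a tiny YAML block with indentation for a dotted path.
--
--     Return an indented YAML block like:
--     parent:
--       child: <example>
--     """
--     if not path:
--         return leaf
--     parts = path.split(".")
--     indent = ""
--     lines = []
--     for i, p in enumerate(parts):
--         if i == len(parts) - 1:
--             lines.append(f"{indent}{p}: {leaf}")
--         else:
--             lines.append(f"{indent}{p}:")
--         indent += "  "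
--     return "\n" + "\n".join(lines)
-- ===== SOURCE B (Python) =====
-- def _yaml_block_for_path(path: str, leaf: str) -> str:
--     """Build a tiny YAML block with indentation for a dotted path."""
--     if not path:
--         return leaf
--
--     def rec(parts, indent):
--         p, *rest = parts
--         if not rest:
--             return f"{indent}{p}: {leaf}"
--         return f"{indent}{p}:\n" + rec(rest, indent + "  ")
--
--     return "\n" + rec(path.split("."), "")
-- ===== Notes on version B (the rewrite author's own statement) =====
-- stated objective: alternative
-- what changed: Replaces the flat indexed loop that accumulates a list of lines (with an is-last-index test) and joins them, by a structural recursion over the split path that threads the indentation down and builds the block back-to-front by string concatenation.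
import Mathlib
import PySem

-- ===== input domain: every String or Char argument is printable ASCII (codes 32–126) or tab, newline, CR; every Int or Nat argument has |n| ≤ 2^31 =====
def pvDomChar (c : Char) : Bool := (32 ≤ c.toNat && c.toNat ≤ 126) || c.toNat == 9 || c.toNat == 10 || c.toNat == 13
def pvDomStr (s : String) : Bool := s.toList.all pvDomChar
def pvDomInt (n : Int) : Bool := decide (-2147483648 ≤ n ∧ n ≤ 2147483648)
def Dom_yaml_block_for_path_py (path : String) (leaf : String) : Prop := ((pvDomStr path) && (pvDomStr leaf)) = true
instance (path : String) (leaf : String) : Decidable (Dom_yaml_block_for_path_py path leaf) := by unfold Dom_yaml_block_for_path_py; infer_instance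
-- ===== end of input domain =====

-- B replaces A's flat indexed loop (accumulate lines, join, prepend newline) by a
-- structural recursion over the split path that threads the indent down; alternative
-- decomposition, no speed claim.
-- ===== PORT A =====
-- Port of A: split on '.', loop over parts with an index counter, indentation string
-- and accumulated lines in the fold state; join the lines and prepend one newline.
def yaml_block_for_path_py (path : String) (leaf : String) : String :=
  if path = "" then leaf
  else
    let parts := (PySem.Str.split? path ".").getD []
    let st := parts.foldl (fun (st : Nat × String × List String) p =>
        let line := if st.1 = parts.length - 1 then st.2.1 ++ p ++ ": " ++ leaf
                    else st.2.1 ++ p ++ ":"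
        (st.1 + 1, st.2.1 ++ "  ", st.2.2 ++ [line])) (0, "", [])
    "\n" ++ PySem.Str.join "\n" st.2.2

-- ===== PORT B =====
-- Port of B: structural recursion over the split path, threading the indent down.
def ybRec (leaf : String) : List String → String → String
  | [], _ => ""
  | [p], indent => indent ++ p ++ ": " ++ leaf
  | p :: q :: rest, indent => indent ++ p ++ ":\n" ++ ybRec leaf (q :: rest) (indent ++ "  ")

def yaml_block_for_path_py_alt (path : String) (leaf : String) : String :=
  if path = "" then leaf
  else "\n" ++ ybRec leaf ((PySem.Str.split? path ".").getD []) ""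

-- ===== PRECONDITION & SPEC =====
def Spec_yaml_block_for_path_py (path : String) (leaf : String) (out : String) : Prop := out = yaml_block_for_path_py_alt path leaf
instance (path : String) (leaf : String) (out : String) : Decidable (Spec_yaml_block_for_path_py path leaf out) := by unfold Spec_yaml_block_for_path_py; infer_instance

-- ===== CLAIM (what is proved, stated in full; the proofs are below) =====
def Claim_equal_yaml_block_for_path_py : Prop := ∀ (path : String) (leaf : String), Dom_yaml_block_for_path_py path leaf → Spec_yaml_block_for_path_py path leaf (yaml_block_for_path_py path leaf)

-- ===== LEMMAS AND PROOFS =====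

-- joining with sep glues two adjacent pieces into one piece containing sep
theorem cjoin_pair (sep a b : List Char) :
    ∀ l : List (List Char),
      PySem.Chars.join sep (l ++ [a, b]) = PySem.Chars.join sep (l ++ [a ++ sep ++ b])
  | [] => by
      simp [PySem.Chars.join_cons_cons, PySem.Chars.join_singleton, List.append_assoc]
  | [x] => by
      simp only [List.cons_append, List.nil_append, PySem.Chars.join_cons_cons,
        PySem.Chars.join_singleton, List.append_assoc]
  | x :: y :: l => by
      have ih := cjoin_pair sep a b (y :: l)
      simp only [List.cons_append] at ih ⊢
      rw [PySem.Chars.join_cons_cons, PySem.Chars.join_cons_cons, ih]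

theorem sjoin_pair (sep a b : String) (l : List String) :
    PySem.Str.join sep (l ++ [a, b]) = PySem.Str.join sep (l ++ [a ++ sep ++ b]) := by
  apply String.toList_injective
  simp [PySem.Str.toList_join, cjoin_pair]

theorem sjoin_singleton (sep a : String) : PySem.Str.join sep [a] = a := by
  apply String.toList_injective
  simp [PySem.Str.toList_join, PySem.Chars.join_singleton]

theorem loop_eq (leaf : String) (n : Nat) :
    ∀ (s : List String) (i : Nat) (indent : String) (acc : List String),
      s ≠ [] → i + s.length = n →
      PySem.Str.join "\n" ((s.foldl (fun (st : Nat × String × List String) p =>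
          let line := if st.1 = n - 1 then st.2.1 ++ p ++ ": " ++ leaf
                      else st.2.1 ++ p ++ ":"
          (st.1 + 1, st.2.1 ++ "  ", st.2.2 ++ [line])) (i, indent, acc)).2.2) =
      PySem.Str.join "\n" (acc ++ [ybRec leaf s indent])
  | [], _, _, _, hne, _ => absurd rfl hne
  | [p], i, indent, acc, _, hn => by
      simp only [List.length_cons, List.length_nil] at hn
      have hi : i = n - 1 := by omega
      simp [List.foldl, ybRec, hi]
  | p :: q :: rest, i, indent, acc, _, hn => by
      simp only [List.length_cons] at hn
      have hi : ¬ (i = n - 1) := by omega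
      have ih := loop_eq leaf n (q :: rest) (i + 1) (indent ++ "  ")
        (acc ++ [indent ++ p ++ ":"]) (by simp) (by simp at hn ⊢; omega)
      simp only [List.foldl, hi, ite_false] at ih ⊢
      rw [ih, List.append_assoc]
      simp only [List.singleton_append]
      rw [sjoin_pair, ybRec]
      congr 2
      simp [String.append_assoc]

theorem join_nil_str : PySem.Str.join "\n" ([] : List String) = "" := by
  apply String.toList_injective
  simp [PySem.Str.toList_join, PySem.Chars.join_nil]

-- ===== VERDICT (by name: the statement is the Claim_ definition above) =====
theorem yaml_block_for_path_py_spec : Claim_equal_yaml_block_for_path_py := by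
  intro path leaf _
  unfold Spec_yaml_block_for_path_py yaml_block_for_path_py yaml_block_for_path_py_alt
  by_cases hp : path = ""
  · simp [hp]
  · simp only [hp, ite_false]
    cases hparts : (PySem.Str.split? path ".").getD [] with
    | nil => simp [ybRec, join_nil_str]
    | cons h t =>
      have := loop_eq leaf (h :: t).length (h :: t) 0 "" [] (by simp) (by simp)
      simp only [List.nil_append] at this
      rw [this, sjoin_singleton]
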